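-- pv_equiv track=rewrite | github.com/asdafa3/abstract-to-title-generation | src/dataset_utils.py | match_titles
-- ===== SOURCE A (Python) =====
-- def match_titles(titles, classes, fillin):
--   matched_titles = []
--   for title_row in titles:
--       matched_row = []
--       row = dict(title_row)
--       for generator in classes:
--         if generator in row:
--           matched_row.append(row[generator])
--         else:
--           matched_row.append(fillin)
--
--       matched_titles.append(matched_row)
--
--   return matched_titles
-- ===== SOURCE B (Python) =====
-- def match_titles(titles, classes, fillin):
--     # Precompute class -> all column positions (duplicates kept), then scatter
--     # each sparse row into a prefilled row; later pairs overwrite (dict last-wins).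
--     index = {}
--     for i, c in enumerate(classes):
--         index.setdefault(c, []).append(i)
--     n = len(classes)
--     matched_titles = []
--     for title_row in titles:
--         out = [fillin] * n
--         for k, v in title_row:
--             for i in index.get(k, []):
--                 out[i] = v
--         matched_titles.append(out)
--     return matched_titles
-- ===== Notes on version B (the rewrite author's own statement) =====
-- stated objective: alternative
-- what changed: Replaces the per-row dict build plus a lookup for every class with a one-time class-to-positions index; each row starts as [fillin]*len(classes) and the sparse (key,value) pairs are scattered into their precomputed positions in order, so the inner per-class dict lookup disappears.
import Mathlib
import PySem

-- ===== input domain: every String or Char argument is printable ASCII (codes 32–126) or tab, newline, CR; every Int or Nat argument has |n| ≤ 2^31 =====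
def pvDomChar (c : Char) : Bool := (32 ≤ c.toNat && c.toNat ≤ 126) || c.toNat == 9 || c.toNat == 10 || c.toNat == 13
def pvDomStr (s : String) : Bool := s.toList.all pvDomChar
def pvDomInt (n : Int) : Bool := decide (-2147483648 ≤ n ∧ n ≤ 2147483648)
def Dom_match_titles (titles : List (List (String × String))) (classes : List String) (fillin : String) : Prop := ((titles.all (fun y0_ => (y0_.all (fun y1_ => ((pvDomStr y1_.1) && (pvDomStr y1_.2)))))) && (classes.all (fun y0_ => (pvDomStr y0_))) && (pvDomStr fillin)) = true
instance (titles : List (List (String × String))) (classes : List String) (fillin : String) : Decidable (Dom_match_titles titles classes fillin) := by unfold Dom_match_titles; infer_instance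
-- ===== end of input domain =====

-- B replaces A's per-row dict + per-class lookup with a precomputed class→positions
-- index and scatters each row's pairs into a prefilled row (objective: alternative).

-- ===== PORT A =====
-- row[generator] under the 'generator in row' guard: getD's default is never used.
def match_titles (titles : List (List (String × String))) (classes : List String) (fillin : String) : List (List String) :=
  titles.foldl (fun matched_titles title_row =>
    let row : PySem.Dict String String :=
      title_row.foldl (fun d p => d.insert p.1 p.2) PySem.Dict.empty
    let matched_row := classes.foldl (fun mr generator =>
      if row.contains generator then mr ++ [row.getD generator fillin]
      else mr ++ [fillin]) []
    matched_titles ++ [matched_row]) []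

-- ===== PORT B =====
-- index = {}; for i, c in enumerate(classes): index.setdefault(c, []).append(i)
def pvBuildIndex (classes : List String) : PySem.Dict String (List Int) :=
  (PySem.List.enumerate classes 0).foldl
    (fun d p => d.modify p.2 [] (· ++ [p.1])) PySem.Dict.empty

def match_titles_alt (titles : List (List (String × String))) (classes : List String) (fillin : String) : List (List String) :=
  let index := pvBuildIndex classes
  titles.foldl (fun matched_titles title_row =>
    let out := title_row.foldl (fun o p =>
      (index.getD p.1 []).foldl (fun o2 i => PySem.List.pySetD o2 i p.2) o)
      (List.replicate classes.length fillin)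
    matched_titles ++ [out]) []

-- ===== PRECONDITION & SPEC =====
def Spec_match_titles (titles : List (List (String × String))) (classes : List String) (fillin : String) (out : List (List String)) : Prop := out = match_titles_alt titles classes fillin
instance (titles : List (List (String × String))) (classes : List String) (fillin : String) (out : List (List String)) : Decidable (Spec_match_titles titles classes fillin out) := by unfold Spec_match_titles; infer_instance

-- ===== CLAIM (what is proved, stated in full; the proofs are below) =====
def Claim_equal_match_titles : Prop := ∀ (titles : List (List (String × String))) (classes : List String) (fillin : String), Dom_match_titles titles classes fillin → Spec_match_titles titles classes fillin (match_titles titles classes fillin)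

-- ===== LEMMAS AND PROOFS =====

-- A's inner loop builds classes.map (lookup) (the else branch IS getD on a missing key).
theorem pvRowA_eq_map (fillin : String) (d : PySem.Dict String String) :
    ∀ (cs : List String) (init : List String),
      cs.foldl (fun mr g => if d.contains g then mr ++ [d.getD g fillin] else mr ++ [fillin]) init
        = init ++ cs.map (fun g => d.getD g fillin) := by
  intro cs
  induction cs with
  | nil => intro init; simp
  | cons c t ih =>
    intro init
    simp only [List.foldl_cons, List.map_cons]
    by_cases h : d.contains c = true
    · rw [if_pos h, ih]; simp
    · rw [if_neg h, ih, PySem.Dict.getD_of_not_contains _ _ (by simpa using h)]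
      simp

-- the index characterized: positions stored for k are the enumerate pairs with class k
theorem pvIndex_getD (classes : List String) (k : String) :
    (pvBuildIndex classes).getD k []
      = ((PySem.List.enumerate classes 0).filter (fun p => p.2 == k)).map (·.1) := by
  unfold pvBuildIndex
  rw [show (PySem.List.enumerate classes 0).foldl
        (fun d p => d.modify p.2 [] (· ++ [p.1])) PySem.Dict.empty
      = ((PySem.List.enumerate classes 0).map Prod.swap).foldl
        (fun d p => d.modify p.1 [] (· ++ [p.2])) PySem.Dict.empty from by
    rw [List.foldl_map]; rfl]
  rw [PySem.Dict.getD_foldl_modify_append]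
  simp [List.filter_map, Function.comp_def, PySem.Dict.getD_empty]

theorem pvMem_index (classes : List String) (k : String) (j : Nat) (hj : j < classes.length) :
    ((j : Int) ∈ (pvBuildIndex classes).getD k []) ↔ classes[j] = k := by
  rw [pvIndex_getD]
  simp only [List.mem_map, List.mem_filter, PySem.List.mem_enumerate_iff]
  constructor
  · rintro ⟨p, ⟨⟨m, hm, rfl⟩, hk⟩, h1⟩
    simp only [beq_iff_eq] at hk
    have : m = j := by simpa using h1
    subst this; exact hk
  · intro hk
    exact ⟨((j : Int), classes[j]), ⟨⟨j, hj, by simp⟩, by simpa using hk⟩, rfl⟩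

theorem pvIndex_nonneg (classes : List String) (k : String) (i : Int)
    (h : i ∈ (pvBuildIndex classes).getD k []) : 0 ≤ i := by
  rw [pvIndex_getD] at h
  simp only [List.mem_map, List.mem_filter, PySem.List.mem_enumerate_iff] at h
  obtain ⟨p, ⟨⟨m, hm, rfl⟩, -⟩, rfl⟩ := h
  simp

theorem pvSetFold_length (v : String) :
    ∀ (l : List Int) (o : List String),
      (l.foldl (fun o2 i => PySem.List.pySetD o2 i v) o).length = o.length := by
  intro l
  induction l with
  | nil => intro o; simp
  | cons i t ih => intro o; simp [List.foldl_cons, ih, PySem.List.length_pySetD]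

theorem pvSetFold_getElem? (v : String) :
    ∀ (l : List Int), (∀ i ∈ l, 0 ≤ i) → ∀ (o : List String) (j : Nat), j < o.length →
      (l.foldl (fun o2 i => PySem.List.pySetD o2 i v) o)[j]?
        = if (j : Int) ∈ l then some v else o[j]? := by
  intro l
  induction l with
  | nil => intro _ o j hj; simp
  | cons i t ih =>
    intro hnn o j hj
    have hi : 0 ≤ i := hnn i (by simp)
    have hset : PySem.List.pySetD o i v = o.set i.toNat v :=
      PySem.List.pySetD_of_nonneg o v hi
    simp only [List.foldl_cons, hset]
    rw [ih (fun x hx => hnn x (by simp [hx])) _ j (by simpa using hj)]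
    by_cases ht : (j : Int) ∈ t
    · simp [List.mem_cons, ht]
    · by_cases hji : (j : Int) = i
      · have hjt : j = i.toNat := by omega
        subst hjt
        simp [hji, hj]
      · have hne : i.toNat ≠ j := by omega
        simp [ht, hji, List.getElem?_set_ne hne]

-- core invariant: scattering a row's pairs tracks the dict built by inserting them
theorem pvScatter_spec (classes : List String) (fillin : String) :
    ∀ (row : List (String × String)) (o : List String) (d : PySem.Dict String String),
      o.length = classes.length →
      (∀ j (h : j < classes.length), o[j]? = some (d.getD classes[j] fillin)) →
      (row.foldl (fun o p =>
          ((pvBuildIndex classes).getD p.1 []).foldl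
            (fun o2 i => PySem.List.pySetD o2 i p.2) o) o).length = classes.length ∧
      ∀ j (h : j < classes.length),
        (row.foldl (fun o p =>
          ((pvBuildIndex classes).getD p.1 []).foldl
            (fun o2 i => PySem.List.pySetD o2 i p.2) o) o)[j]?
          = some ((row.foldl (fun d p => d.insert p.1 p.2) d).getD classes[j] fillin) := by
  intro row
  induction row with
  | nil => intro o d hlen hinv; exact ⟨hlen, hinv⟩
  | cons p t ih =>
    intro o d hlen hinv
    simp only [List.foldl_cons]
    apply ih
    · rw [pvSetFold_length, hlen]
    · intro j hj
      rw [pvSetFold_getElem? p.2 _ (fun i hi => pvIndex_nonneg classes p.1 i hi) o j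
        (by omega)]
      rw [PySem.Dict.getD_insert]
      by_cases hk : classes[j] = p.1
      · simp [(pvMem_index classes p.1 j hj).mpr hk, hk]
      · rw [if_neg (by
          intro hmem
          exact hk ((pvMem_index classes p.1 j hj).mp hmem)), if_neg hk]
        exact hinv j hj

-- per-row equality
theorem pvRow_eq (classes : List String) (fillin : String) (title_row : List (String × String)) :
    (classes.foldl (fun mr g =>
        if (title_row.foldl (fun d p => d.insert p.1 p.2) PySem.Dict.empty).contains g
        then mr ++ [(title_row.foldl (fun d p => d.insert p.1 p.2) PySem.Dict.empty).getD g fillin]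
        else mr ++ [fillin]) [])
      = title_row.foldl (fun o p =>
          ((pvBuildIndex classes).getD p.1 []).foldl
            (fun o2 i => PySem.List.pySetD o2 i p.2) o)
          (List.replicate classes.length fillin) := by
  have h := pvScatter_spec classes fillin title_row
    (List.replicate classes.length fillin) PySem.Dict.empty (by simp)
    (by intro j hj; simp [hj, PySem.Dict.getD_empty])
  rw [pvRowA_eq_map, List.nil_append]
  apply List.ext_getElem?
  intro j
  by_cases hj : j < classes.length
  · rw [h.2 j hj, List.getElem?_map]
    simp [List.getElem?_eq_getElem hj]
  · rw [List.getElem?_eq_none (by simpa using hj),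
        List.getElem?_eq_none (by rw [h.1]; omega)]

-- ===== VERDICT (by name: the statement is the Claim_ definition above) =====
theorem match_titles_spec : Claim_equal_match_titles := by
  intro titles classes fillin hd
  clear hd
  unfold Spec_match_titles match_titles match_titles_alt
  induction titles using List.reverseRecOn with
  | nil => rfl
  | append_singleton ts r ih =>
    simp only [List.foldl_append, List.foldl_cons, List.foldl_nil]
    rw [ih, pvRow_eq]
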